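-- pv_equiv track=rewrite | github.com/6210qwe/leetcode_py | leetcode_solutions/by_id/q0891.py | matrix_score
-- ===== SOURCE A (Python) =====
-- from typing import List, Optional
--
-- def flip_row(grid: List[List[int]], row: int) -> None:
--     for col in range(len(grid[0])):
--         grid[row][col] = 1 - grid[row][col]
--
-- def flip_col(grid: List[List[int]], col: int) -> None:
--     for row in range(len(grid)):
--         grid[row][col] = 1 - grid[row][col]
--
-- def matrix_score(grid: List[List[int]]) -> int:
--     m, n = len(grid), len(grid[0])
--
--     # 确保每一行的第一个元素为1
--     for row in range(m):
--         if grid[row][0] == 0: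
--             flip_row(grid, row)
--
--     # 逐列检查，如果某一列的0比1多，则翻转该列
--     for col in range(1, n):
--         count_ones = sum(grid[row][col] for row in range(m))
--         if count_ones < (m + 1) // 2:
--             flip_col(grid, col)
--
--     # 计算最终矩阵的得分
--     score = 0
--     for row in range(m):
--         binary_value = 0
--         for col in range(n):
--             binary_value = (binary_value << 1) | grid[row][col]
--         score += binary_value
--
--     return score
-- ===== SOURCE B (Python) =====
-- from typing import List
--
--
-- def matrix_score(grid: List[List[int]]) -> int:
--     # Column-major single pass: walk the columns once, carrying one binary
--     # accumulator per row; choose each column or its complement on the fly.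
--     m, n = len(grid), len(grid[0])
--     first = [row[0] for row in grid]
--     half = (m + 1) // 2
--     acc = [0] * m
--     for j in range(n):
--         col = [1 - row[j] if f == 0 else row[j] for f, row in zip(first, grid)]
--         if j > 0 and sum(col) < half:
--             col = [1 - v for v in col]
--         acc = [(b << 1) | v for b, v in zip(acc, col)]
--     return sum(acc)
-- ===== Notes on version B (the rewrite author's own statement) =====
-- stated objective: alternative
-- what changed: B replaces A's three staged row-major mutation passes (flip rows in place, then flip minority columns in place, then re-read the mutated grid row by row) with one column-major pass: it walks the columns once, carrying a vector of per-row binary accumulators, builds each column's normalized values on the fly, decides there whether to use the column or its complement, and folds it into the accumulators immediately - no flipped matrix ever exists and the argument is never mutated (A mutates grid in place; the equivalence is about the return value only).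
import Mathlib
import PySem

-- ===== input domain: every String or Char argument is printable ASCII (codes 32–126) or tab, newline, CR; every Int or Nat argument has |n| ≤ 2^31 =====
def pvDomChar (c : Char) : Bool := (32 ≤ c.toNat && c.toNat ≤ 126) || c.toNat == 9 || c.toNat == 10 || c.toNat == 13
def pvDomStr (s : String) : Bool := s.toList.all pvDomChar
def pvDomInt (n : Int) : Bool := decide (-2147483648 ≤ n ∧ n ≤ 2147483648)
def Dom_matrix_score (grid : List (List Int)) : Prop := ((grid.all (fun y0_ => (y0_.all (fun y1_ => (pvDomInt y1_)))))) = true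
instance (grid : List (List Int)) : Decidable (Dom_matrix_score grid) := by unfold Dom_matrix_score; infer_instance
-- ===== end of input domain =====

-- B replaces A's three staged in-place mutation passes by one pure column-major pass with a vector of
-- per-row accumulators; A mutates its argument in place while B does not, so the equivalence claimed
-- here is about the RETURN value only.

-- ===== PORT A =====
-- grid[r][c] reads / writes (all in range on every input Pre_ admits; Python raises exactly where Pre_ fails)
def pvGet2 (g : List (List Int)) (r c : Nat) : Int := (g.getD r []).getD c 0
def pvSet2 (g : List (List Int)) (r c : Nat) (v : Int) : List (List Int) :=
  g.set r ((g.getD r []).set c v)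

-- flip_row: for col in range(len(grid[0])): grid[row][col] = 1 - grid[row][col]
def pvFlipRow (g : List (List Int)) (row : Nat) : List (List Int) :=
  (List.range (g.headD []).length).foldl (fun h col => pvSet2 h row col (1 - pvGet2 h row col)) g

-- flip_col: for row in range(len(grid)): grid[row][col] = 1 - grid[row][col]
def pvFlipCol (g : List (List Int)) (col : Nat) : List (List Int) :=
  (List.range g.length).foldl (fun h row => pvSet2 h row col (1 - pvGet2 h row col)) g

def matrix_score (grid : List (List Int)) : Int :=
  let m := grid.length
  let n := (grid.headD []).length
  -- for row in range(m): if grid[row][0] == 0: flip_row(grid, row)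
  let g1 := (List.range m).foldl (fun h row => if pvGet2 h row 0 = 0 then pvFlipRow h row else h) grid
  -- for col in range(1, n): ...   (range(1, n) written as c+1 for c in range(n-1))
  let g2 := (List.range (n - 1)).foldl (fun h c =>
      let col := c + 1
      let countOnes := (List.range m).foldl (fun s row => s + pvGet2 h row col) (0 : Int)
      if countOnes < ((m + 1) / 2 : Nat) then pvFlipCol h col else h) g1
  -- score accumulation; (binary_value << 1) | grid[row][col] is Int shiftLeft / Int.lor (Python's | on ints)
  (List.range m).foldl (fun score row =>
      score + (List.range n).foldl (fun b col => Int.lor (b <<< (1 : Nat)) (pvGet2 g2 row col)) 0) 0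

-- ===== PORT B =====
-- column-major single pass: one fold over the columns carrying a vector of per-row accumulators
def matrix_score_alt (grid : List (List Int)) : Int :=
  let m := grid.length
  let n := (grid.headD []).length
  -- first = [row[0] for row in grid]
  let first := grid.map (fun row => row.getD 0 0)
  let half : Int := ((m + 1) / 2 : Nat)
  -- acc = [0] * m; for j in range(n): ...
  let acc := (List.range n).foldl (fun acc j =>
      -- col = [1 - row[j] if f == 0 else row[j] for f, row in zip(first, grid)]
      let col := (first.zip grid).map (fun fr => if fr.1 = 0 then 1 - fr.2.getD j 0 else fr.2.getD j 0)
      -- if j > 0 and sum(col) < half: col = [1 - v for v in col]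
      let col := if 0 < j ∧ col.sum < half then col.map (fun v => 1 - v) else col
      -- acc = [(b << 1) | v for b, v in zip(acc, col)]
      (acc.zip col).map (fun (bv : Int × Int) => Int.lor (bv.1 <<< (1 : Nat)) bv.2))
    (List.replicate m (0 : Int))
  acc.sum

-- ===== PRECONDITION & SPEC =====
-- Exactly the inputs on which the Python A returns: a nonempty grid whose first row is nonempty and
-- whose every row is at least as long as the first (otherwise A raises IndexError).
def Pre_matrix_score (grid : List (List Int)) : Prop :=
  grid ≠ [] ∧ grid.headD [] ≠ [] ∧ ∀ r ∈ grid, (grid.headD []).length ≤ r.length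

instance (grid : List (List Int)) : Decidable (Pre_matrix_score grid) := by
  unfold Pre_matrix_score; infer_instance

def pvWitness_matrix_score : List (List Int) := [[0, 0, 1, 1], [1, 0, 1, 0], [1, 1, 0, 0]]

def Spec_matrix_score (grid : List (List Int)) (out : Int) : Prop := out = matrix_score_alt grid
instance (grid : List (List Int)) (out : Int) : Decidable (Spec_matrix_score grid out) := by
  unfold Spec_matrix_score; infer_instance

-- ===== CLAIM (what is proved, stated in full; the proofs are below) =====
def Claim_equal_matrix_score : Prop := ∀ (grid : List (List Int)), Dom_matrix_score grid → Pre_matrix_score grid → Spec_matrix_score grid (matrix_score grid)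


-- ===== LEMMAS AND PROOFS =====

-- small getD / set facts used throughout
theorem pv_getD_set_eq {α : Type} (l : List α) (i : Nat) (v d : α) (h : i < l.length) :
    (l.set i v).getD i d = v := by
  simp [List.getD_eq_getElem?_getD, h]

theorem pv_getD_set_ne {α : Type} (l : List α) (i j : Nat) (v d : α) (h : j ≠ i) :
    (l.set i v).getD j d = l.getD j d := by
  simp [List.getD_eq_getElem?_getD, List.getElem?_set_ne (by omega : i ≠ j)]

theorem pv_headD_eq_getD {α : Type} (l : List α) (d : α) : l.headD d = l.getD 0 d := by
  cases l <;> simp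

theorem pv_sum_map (l : List Nat) (φ : Nat → Int) :
    (l.map φ).sum = l.foldl (fun s x => s + φ x) 0 := by
  rw [List.sum_eq_foldl, List.foldl_map]

-- pvSet2 / pvGet2 facts
theorem pvSet2_length (g : List (List Int)) (r c : Nat) (v : Int) :
    (pvSet2 g r c v).length = g.length := by simp [pvSet2]

theorem pvSet2_row (g : List (List Int)) (r c : Nat) (v : Int) (r' : Nat) :
    (pvSet2 g r c v).getD r' [] =
      if r' = r ∧ r < g.length then (g.getD r []).set c v else g.getD r' [] := by
  unfold pvSet2
  by_cases hrr : r' = r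
  · subst hrr
    by_cases hlt : r' < g.length
    · simp [hlt]
    · rw [List.set_eq_of_length_le (by omega)]
      simp [hlt]
  · rw [pv_getD_set_ne g r r' _ [] hrr]
    simp [hrr]

theorem pvSet2_rowlen (g : List (List Int)) (r c : Nat) (v : Int) (r' : Nat) :
    ((pvSet2 g r c v).getD r' []).length = (g.getD r' []).length := by
  rw [pvSet2_row]; split
  · rename_i h; rw [List.length_set]; rw [h.1]
  · rfl

theorem pvGet2_set2_ne (g : List (List Int)) (r c : Nat) (v : Int) (r' c' : Nat)
    (h : r' ≠ r ∨ c' ≠ c) : pvGet2 (pvSet2 g r c v) r' c' = pvGet2 g r' c' := by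
  unfold pvGet2
  rw [pvSet2_row]
  split
  · rename_i hif
    obtain ⟨he, hlt⟩ := hif
    subst he
    have hcc : c' ≠ c := by tauto
    rw [pv_getD_set_ne _ _ _ _ _ hcc]
  · rfl

theorem pvGet2_set2_eq (g : List (List Int)) (r c : Nat) (v : Int)
    (hr : r < g.length) (hc : c < (g.getD r []).length) :
    pvGet2 (pvSet2 g r c v) r c = v := by
  unfold pvGet2
  rw [pvSet2_row, if_pos ⟨rfl, hr⟩, pv_getD_set_eq _ _ _ _ hc]

-- characterization of the inner fold of flip_row
theorem pvFlipRowFold_char (g : List (List Int)) (row : Nat) (k : Nat)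
    (hr : row < g.length) (hk : k ≤ (g.getD row []).length) :
    ((List.range k).foldl (fun h col => pvSet2 h row col (1 - pvGet2 h row col)) g).length = g.length ∧
    (∀ r', (((List.range k).foldl (fun h col => pvSet2 h row col (1 - pvGet2 h row col)) g).getD r' []).length = (g.getD r' []).length) ∧
    (∀ r' c', pvGet2 ((List.range k).foldl (fun h col => pvSet2 h row col (1 - pvGet2 h row col)) g) r' c' =
      if r' = row ∧ c' < k then 1 - pvGet2 g r' c' else pvGet2 g r' c') := by
  induction k with
  | zero => simp
  | succ k ih =>
    obtain ⟨Lk, RLk, Ek⟩ := ih (by omega)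
    rw [List.range_succ, List.foldl_append, List.foldl_cons, List.foldl_nil]
    refine ⟨by rw [pvSet2_length, Lk], fun r' => by rw [pvSet2_rowlen, RLk], fun r' c' => ?_⟩
    have hg : pvGet2 ((List.range k).foldl (fun h col => pvSet2 h row col (1 - pvGet2 h row col)) g) row k = pvGet2 g row k := by
      rw [Ek]; simp
    by_cases hc : r' = row ∧ c' = k
    · obtain ⟨h1, h2⟩ := hc
      subst h1; subst h2
      rw [pvGet2_set2_eq _ _ _ _ (by omega) (by rw [RLk]; omega), hg]
      simp
    · rw [pvGet2_set2_ne _ _ _ _ _ _ (by tauto), Ek r' c']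
      split_ifs <;> first | rfl | omega

theorem pvFlipRow_char (g : List (List Int)) (row : Nat) (n : Nat)
    (hhead : (g.headD []).length = n) (hr : row < g.length) (hn : n ≤ (g.getD row []).length) :
    (pvFlipRow g row).length = g.length ∧
    (∀ r', ((pvFlipRow g row).getD r' []).length = (g.getD r' []).length) ∧
    (∀ r' c', pvGet2 (pvFlipRow g row) r' c' =
      if r' = row ∧ c' < n then 1 - pvGet2 g r' c' else pvGet2 g r' c') := by
  unfold pvFlipRow
  rw [hhead]
  exact pvFlipRowFold_char g row n hr hn

-- characterization of phase 1 (row normalization)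
theorem pvPhase1_char (g : List (List Int)) (n : Nat)
    (hhead : (g.headD []).length = n)
    (hlen : ∀ r, r < g.length → n ≤ (g.getD r []).length) (k : Nat) (hk : k ≤ g.length) :
    ((List.range k).foldl (fun h row => if pvGet2 h row 0 = 0 then pvFlipRow h row else h) g).length = g.length ∧
    (∀ r', (((List.range k).foldl (fun h row => if pvGet2 h row 0 = 0 then pvFlipRow h row else h) g).getD r' []).length = (g.getD r' []).length) ∧
    (∀ r' c', pvGet2 ((List.range k).foldl (fun h row => if pvGet2 h row 0 = 0 then pvFlipRow h row else h) g) r' c' =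
      if r' < k ∧ c' < n ∧ pvGet2 g r' 0 = 0 then 1 - pvGet2 g r' c' else pvGet2 g r' c') := by
  induction k with
  | zero => simp
  | succ k ih =>
    obtain ⟨Lk, RLk, Ek⟩ := ih (by omega)
    rw [List.range_succ, List.foldl_append, List.foldl_cons, List.foldl_nil]
    have hread : pvGet2 ((List.range k).foldl (fun h row => if pvGet2 h row 0 = 0 then pvFlipRow h row else h) g) k 0 = pvGet2 g k 0 := by
      rw [Ek]; simp
    rw [hread]
    by_cases hguard : pvGet2 g k 0 = 0
    · rw [if_pos hguard]
      obtain ⟨L2, RL2, E2⟩ := pvFlipRow_char _ k n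
        (by rw [pv_headD_eq_getD, RLk, ← pv_headD_eq_getD, hhead])
        (by omega)
        (by rw [RLk]; exact hlen k (by omega))
      refine ⟨L2.trans Lk, fun r' => (RL2 r').trans (RLk r'), fun r' c' => ?_⟩
      rw [E2]
      by_cases hr' : r' = k
      · have hEk : ∀ c'', pvGet2 ((List.range k).foldl (fun h row => if pvGet2 h row 0 = 0 then pvFlipRow h row else h) g) k c'' = pvGet2 g k c'' := by
          intro c''; rw [Ek]; simp
        by_cases hcn : c' < n <;> simp [hr', hcn, hEk, hguard]
      · have hiff : (r' < k) ↔ (r' < k + 1) := by omega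
        rw [if_neg (by tauto : ¬(r' = k ∧ c' < n)), Ek]
        simp only [hiff]
    · rw [if_neg hguard]
      refine ⟨Lk, RLk, fun r' c' => ?_⟩
      rw [Ek]
      by_cases hr' : r' = k
      · simp [hr', hguard]
      · have hiff : (r' < k) ↔ (r' < k + 1) := by omega
        simp only [hiff]

-- characterization of flip_col
theorem pvFlipColFold_char (g : List (List Int)) (col : Nat) (k : Nat)
    (hcol : ∀ r, r < g.length → col < (g.getD r []).length) (hk : k ≤ g.length) :
    ((List.range k).foldl (fun h r => pvSet2 h r col (1 - pvGet2 h r col)) g).length = g.length ∧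
    (∀ r', (((List.range k).foldl (fun h r => pvSet2 h r col (1 - pvGet2 h r col)) g).getD r' []).length = (g.getD r' []).length) ∧
    (∀ r' c', pvGet2 ((List.range k).foldl (fun h r => pvSet2 h r col (1 - pvGet2 h r col)) g) r' c' =
      if r' < k ∧ c' = col then 1 - pvGet2 g r' c' else pvGet2 g r' c') := by
  induction k with
  | zero => simp
  | succ k ih =>
    obtain ⟨Lk, RLk, Ek⟩ := ih (by omega)
    rw [List.range_succ, List.foldl_append, List.foldl_cons, List.foldl_nil]
    refine ⟨by rw [pvSet2_length, Lk], fun r' => by rw [pvSet2_rowlen, RLk], fun r' c' => ?_⟩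
    have hg : pvGet2 ((List.range k).foldl (fun h r => pvSet2 h r col (1 - pvGet2 h r col)) g) k col = pvGet2 g k col := by
      rw [Ek]; simp
    by_cases hc : r' = k ∧ c' = col
    · obtain ⟨h1, h2⟩ := hc
      subst h1; subst h2
      rw [pvGet2_set2_eq _ _ _ _ (by omega) (by rw [RLk]; exact hcol r' (by omega)), hg]
      simp
    · rw [pvGet2_set2_ne _ _ _ _ _ _ (by tauto), Ek r' c']
      split_ifs <;> first | rfl | omega

-- the per-row normalized value, the column sums of the normalized grid, and phase 2
def pvNval (g : List (List Int)) (r c : Nat) : Int :=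
  if pvGet2 g r 0 = 0 then 1 - pvGet2 g r c else pvGet2 g r c

def pvCnt (g1 : List (List Int)) (m c : Nat) : Int :=
  (List.range m).foldl (fun s r => s + pvGet2 g1 r c) 0

def pvCntN (g : List (List Int)) (m c : Nat) : Int :=
  (List.range m).foldl (fun s r => s + pvNval g r c) 0

theorem pvFlipCol_char (g : List (List Int)) (col : Nat)
    (hcol : ∀ r, r < g.length → col < (g.getD r []).length) :
    (pvFlipCol g col).length = g.length ∧
    (∀ r', ((pvFlipCol g col).getD r' []).length = (g.getD r' []).length) ∧
    (∀ r' c', pvGet2 (pvFlipCol g col) r' c' =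
      if r' < g.length ∧ c' = col then 1 - pvGet2 g r' c' else pvGet2 g r' c') := by
  unfold pvFlipCol
  exact pvFlipColFold_char g col g.length hcol le_rfl

theorem pvPhase2_char (g1 : List (List Int)) (n m : Nat) (hm : g1.length = m)
    (hlen1 : ∀ r, r < m → n ≤ (g1.getD r []).length) (k : Nat) (hk : k ≤ n - 1) :
    ((List.range k).foldl (fun h c =>
        if (List.range m).foldl (fun s row => s + pvGet2 h row (c + 1)) (0 : Int) < ((m + 1) / 2 : Nat)
        then pvFlipCol h (c + 1) else h) g1).length = m ∧
    (∀ r', (((List.range k).foldl (fun h c =>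
        if (List.range m).foldl (fun s row => s + pvGet2 h row (c + 1)) (0 : Int) < ((m + 1) / 2 : Nat)
        then pvFlipCol h (c + 1) else h) g1).getD r' []).length = (g1.getD r' []).length) ∧
    (∀ r' c', pvGet2 ((List.range k).foldl (fun h c =>
        if (List.range m).foldl (fun s row => s + pvGet2 h row (c + 1)) (0 : Int) < ((m + 1) / 2 : Nat)
        then pvFlipCol h (c + 1) else h) g1) r' c' =
      if r' < m ∧ 0 < c' ∧ c' ≤ k ∧ pvCnt g1 m c' < ((m + 1) / 2 : Nat)
      then 1 - pvGet2 g1 r' c' else pvGet2 g1 r' c') := by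
  induction k with
  | zero =>
    refine ⟨hm, fun r' => rfl, fun r' c' => ?_⟩
    rw [List.range_zero, List.foldl_nil, if_neg (by omega)]
  | succ k ih =>
    obtain ⟨Lk, RLk, Ek⟩ := ih (by omega)
    rw [List.range_succ, List.foldl_append, List.foldl_cons, List.foldl_nil]
    have hcnt : (List.range m).foldl (fun s row => s + pvGet2 ((List.range k).foldl (fun h c =>
        if (List.range m).foldl (fun s row => s + pvGet2 h row (c + 1)) (0 : Int) < ((m + 1) / 2 : Nat)
        then pvFlipCol h (c + 1) else h) g1) row (k + 1)) (0 : Int) = pvCnt g1 m (k + 1) := by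
      unfold pvCnt
      apply PySem.List.foldl_congr_mem
      intro acc x hx
      rw [Ek, if_neg (by omega)]
    rw [hcnt]
    by_cases hq : pvCnt g1 m (k + 1) < ((m + 1) / 2 : Nat)
    · rw [if_pos hq]
      have hcol2 : ∀ r, r < ((List.range k).foldl (fun h c =>
          if (List.range m).foldl (fun s row => s + pvGet2 h row (c + 1)) (0 : Int) < ((m + 1) / 2 : Nat)
          then pvFlipCol h (c + 1) else h) g1).length →
          (k + 1) < (((List.range k).foldl (fun h c =>
          if (List.range m).foldl (fun s row => s + pvGet2 h row (c + 1)) (0 : Int) < ((m + 1) / 2 : Nat)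
          then pvFlipCol h (c + 1) else h) g1).getD r []).length := by
        intro r hr
        rw [RLk]
        rw [Lk] at hr
        have := hlen1 r hr
        omega
      obtain ⟨L2, RL2, E2⟩ := pvFlipCol_char _ (k + 1) hcol2
      refine ⟨L2.trans Lk, fun r' => (RL2 r').trans (RLk r'), fun r' c' => ?_⟩
      rw [E2]
      by_cases hcc : c' = k + 1
      · subst hcc
        have hv : pvGet2 ((List.range k).foldl (fun h c =>
            if (List.range m).foldl (fun s row => s + pvGet2 h row (c + 1)) (0 : Int) < ((m + 1) / 2 : Nat)
            then pvFlipCol h (c + 1) else h) g1) r' (k + 1) = pvGet2 g1 r' (k + 1) := by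
          rw [Ek, if_neg (by omega)]
        by_cases hrr : r' < m
        · rw [if_pos ⟨by rw [Lk]; exact hrr, rfl⟩, hv,
            if_pos ⟨hrr, by omega, by omega, hq⟩]
        · rw [if_neg (fun h => hrr (Lk ▸ h.1)), hv,
            if_neg (fun h => hrr h.1)]
      · rw [if_neg (fun h => hcc h.2), Ek]
        have hiff : (c' ≤ k) ↔ (c' ≤ k + 1) := by omega
        simp only [hiff]
    · rw [if_neg hq]
      refine ⟨Lk, RLk, fun r' c' => ?_⟩
      rw [Ek]
      by_cases hcc : c' = k + 1
      · rw [if_neg (fun h => absurd h.2.2.1 (by omega)), if_neg (fun h => hq (hcc ▸ h.2.2.2))]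
      · have hiff : (c' ≤ k) ↔ (c' ≤ k + 1) := by omega
        simp only [hiff]

-- the effective value both programs score at row r, column c
def pvEff (g : List (List Int)) (r c : Nat) : Int :=
  if 0 < c ∧ pvCntN g g.length c < ((g.length + 1) / 2 : Nat) then 1 - pvNval g r c else pvNval g r c

-- both programs compute the same normal form: score of the normalized grid with column flips
theorem pvA_eq (grid : List (List Int)) (n : Nat) (hn : (grid.headD []).length = n) (hnpos : 0 < n)
    (hlen : ∀ r, r < grid.length → n ≤ (grid.getD r []).length) :
    matrix_score grid = (List.range grid.length).foldl (fun s r => s +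
      (List.range n).foldl (fun b c => Int.lor (b <<< (1 : Nat)) (pvEff grid r c)) 0) 0 := by
  simp only [matrix_score, pvEff]
  rw [hn]
  obtain ⟨L1, RL1, E1⟩ := pvPhase1_char grid n hn hlen grid.length le_rfl
  have hv1 : ∀ r c, r < grid.length → c < n →
      pvGet2 ((List.range grid.length).foldl (fun h row => if pvGet2 h row 0 = 0 then pvFlipRow h row else h) grid) r c
        = pvNval grid r c := by
    intro r c hr hc
    rw [E1]
    unfold pvNval
    by_cases h0 : pvGet2 grid r 0 = 0 <;> simp [h0, hr, hc]
  have hlen1 : ∀ r, r < grid.length →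
      n ≤ (((List.range grid.length).foldl (fun h row => if pvGet2 h row 0 = 0 then pvFlipRow h row else h) grid).getD r []).length := by
    intro r hr; rw [RL1]; exact hlen r hr
  obtain ⟨L2, RL2, E2⟩ := pvPhase2_char _ n grid.length L1 hlen1 (n - 1) le_rfl
  have hcnt : ∀ c, c < n →
      pvCnt ((List.range grid.length).foldl (fun h row => if pvGet2 h row 0 = 0 then pvFlipRow h row else h) grid) grid.length c
        = pvCntN grid grid.length c := by
    intro c hc
    unfold pvCnt pvCntN
    apply PySem.List.foldl_congr_mem
    intro acc x hx
    rw [hv1 x c (List.mem_range.mp hx) hc]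
  apply PySem.List.foldl_congr_mem
  intro s r hr
  congr 1
  apply PySem.List.foldl_congr_mem
  intro b c hc
  have hr' := List.mem_range.mp hr
  have hc' := List.mem_range.mp hc
  congr 1
  rw [E2 r c, hcnt c hc', hv1 r c hr' hc']
  have hCiff : (r < grid.length ∧ 0 < c ∧ c ≤ n - 1 ∧ pvCntN grid grid.length c < ((grid.length + 1) / 2 : Nat))
      ↔ (0 < c ∧ pvCntN grid grid.length c < ((grid.length + 1) / 2 : Nat)) := by
    constructor
    · rintro ⟨_, h2, _, h4⟩; exact ⟨h2, h4⟩
    · rintro ⟨h2, h4⟩; exact ⟨hr', h2, by omega, h4⟩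
  simp only [hCiff]

-- B-side proof helpers: the raw normalized column, the effective column, and one accumulator step
def pvColRaw (grid : List (List Int)) (j : Nat) : List Int :=
  ((grid.map (fun row => row.getD 0 0)).zip grid).map
    (fun fr => if fr.1 = 0 then 1 - fr.2.getD j 0 else fr.2.getD j 0)

def pvColEff (grid : List (List Int)) (j : Nat) : List Int :=
  if 0 < j ∧ (pvColRaw grid j).sum < (((grid.length + 1) / 2 : Nat) : Int)
  then (pvColRaw grid j).map (fun v => 1 - v) else pvColRaw grid j

def pvStep (grid : List (List Int)) (acc : List Int) (j : Nat) : List Int :=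
  (acc.zip (pvColEff grid j)).map (fun (bv : Int × Int) => Int.lor (bv.1 <<< (1 : Nat)) bv.2)

-- one column step produces exactly the effective values of that column
theorem pvB_col (grid : List (List Int)) (j : Nat) :
    pvColEff grid j = (List.range grid.length).map (fun r => pvEff grid r j) := by
  have hcolz : pvColRaw grid j = (List.range grid.length).map (fun r => pvNval grid r j) := by
    unfold pvColRaw
    apply List.ext_getElem
    · simp
    · intro i h1 h2
      have hi : i < grid.length := by simpa using h2
      simp only [List.getElem_map, List.getElem_zip, List.getElem_range]
      simp [pvNval, pvGet2, List.getD_eq_getElem?_getD, List.getElem?_eq_getElem hi]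
  have hsum : ((List.range grid.length).map (fun r => pvNval grid r j)).sum = pvCntN grid grid.length j := by
    rw [pv_sum_map]; rfl
  unfold pvColEff
  rw [hcolz, hsum]
  by_cases hq : 0 < j ∧ pvCntN grid grid.length j < (((grid.length + 1) / 2 : Nat) : Int)
  · rw [if_pos hq, List.map_map]
    apply List.map_congr_left
    intro r hr
    simp only [Function.comp, pvEff, if_pos hq]
  · rw [if_neg hq]
    apply List.map_congr_left
    intro r hr
    simp only [pvEff, if_neg hq]

theorem pvB_eq (grid : List (List Int)) (n : Nat) (hn : (grid.headD []).length = n) :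
    matrix_score_alt grid = (List.range grid.length).foldl (fun s r => s +
      (List.range n).foldl (fun b c => Int.lor (b <<< (1 : Nat)) (pvEff grid r c)) 0) 0 := by
  have h0 : matrix_score_alt grid =
      ((List.range n).foldl (fun acc j => pvStep grid acc j) (List.replicate grid.length (0 : Int))).sum := by
    rw [← hn]; rfl
  rw [h0]
  -- invariant: after k columns the accumulator vector holds each row's partial binary value
  have hinv : ∀ k, (List.range k).foldl (fun acc j => pvStep grid acc j) (List.replicate grid.length (0 : Int))
      = (List.range grid.length).map (fun r =>
          (List.range k).foldl (fun b c => Int.lor (b <<< (1 : Nat)) (pvEff grid r c)) 0) := by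
    intro k
    induction k with
    | zero =>
      simp [List.map_const']
    | succ k ih =>
      rw [List.range_succ, List.foldl_append, List.foldl_cons, List.foldl_nil, ih]
      unfold pvStep
      rw [pvB_col, List.zip_map', List.map_map]
      apply List.map_congr_left
      intro r hr
      simp [List.foldl_append]
  rw [hinv n, pv_sum_map]

-- ===== VERDICT (by name: the statement is the Claim_ definition above) =====
theorem matrix_score_spec : Claim_equal_matrix_score := by
  intro grid hDom hPre
  unfold Spec_matrix_score
  obtain ⟨hne, hhd, hmem⟩ := hPre
  have hlen : ∀ r, r < grid.length → (grid.headD []).length ≤ (grid.getD r []).length := by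
    intro r hr
    have hmemr : grid.getD r [] ∈ grid := by
      rw [List.getD_eq_getElem?_getD, List.getElem?_eq_getElem hr]
      exact List.getElem_mem hr
    exact hmem _ hmemr
  have hnpos : 0 < (grid.headD []).length := List.length_pos_of_ne_nil hhd
  exact (pvA_eq grid _ rfl hnpos hlen).trans (pvB_eq grid _ rfl).symm
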